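-- pv_equiv track=rewrite | github.com/vangggggggg/DemoPython | Bai2.py | Profit_max
-- ===== SOURCE A (Python) =====
-- def Profit_max(k,prices):
--     # if not prices:
--     #     return 0
--
--     # n = len(prices)
--     # if k >= n // 2:
--     #     return sum(max(prices[i+1] - prices[i], 0) for i in range(n-1))
--
--     # # Khởi tạo mảng lưu lợi nhuận của k giao dịch gần nhất
--     # profits = [0] * k
--     # for i in range(n):
--     #     # Tính lợi nhuận cho từng giao dịch tại ngày i
--     #     for j in range(k-1, -1, -1):
--     #         profits[j] = max(profits[j], prices[i] - (prices[j-1] if j > 0 else 0) + (profits[j-1] if j > 0 else 0))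
--
--     # return profits[-1]
--     if not prices:
--         return 0
--
--     # Khởi tạo một danh sách các khoảng cách giữa các điểm mua và bán.
--     transactions = []
--
--     # Tìm tất cả các khoảng cách giữa các điểm mua và bán.
--     for i in range(len(prices) - 1):
--         if prices[i + 1] > prices[i]:
--             transactions.append(prices[i + 1] - prices[i])
--
--     # Sắp xếp danh sách các khoảng cách giảm dần.
--     transactions.sort(reverse=True)
--
--     # Lấy tổng của k khoảng cách có giá trị lớn nhất.
--     max_profit = 0
--     for i in range(k):
--         if i < len(transactions):
--             max_profit += transactions[i]
--
--     return max_profit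
-- ===== SOURCE B (Python) =====
-- def _sum_largest(k, xs):
--     # sum of the k largest elements of xs (all of them if k >= len(xs), 0 if k <= 0),
--     # by iterative quickselect-style partitioning around a middle pivot.
--     acc = 0
--     while True:
--         if k <= 0:
--             return acc
--         if len(xs) <= k:
--             return acc + sum(xs)
--         pivot = xs[len(xs) // 2]
--         hi = [x for x in xs if x > pivot]
--         if k <= len(hi):
--             xs = hi
--             continue
--         eq = [x for x in xs if x == pivot]
--         if k - len(hi) <= len(eq):
--             return acc + sum(hi) + (k - len(hi)) * pivot
--         lo = [x for x in xs if x < pivot]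
--         acc += sum(hi) + sum(eq)
--         k -= len(hi) + len(eq)
--         xs = lo
--
-- def Profit_max(k, prices):
--     gains = [b - a for a, b in zip(prices, prices[1:]) if b > a]
--     return _sum_largest(k, gains)
-- ===== Notes on version B (the rewrite author's own statement) =====
-- stated objective: alternative
-- what changed: B pairs adjacent prices with zip to collect positive gains and then sums the k largest by an iterative quickselect-style three-way partition around a middle pivot, instead of A's index loop, full descending sort and a range(k) scan with a bounds guard.
import Mathlib
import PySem

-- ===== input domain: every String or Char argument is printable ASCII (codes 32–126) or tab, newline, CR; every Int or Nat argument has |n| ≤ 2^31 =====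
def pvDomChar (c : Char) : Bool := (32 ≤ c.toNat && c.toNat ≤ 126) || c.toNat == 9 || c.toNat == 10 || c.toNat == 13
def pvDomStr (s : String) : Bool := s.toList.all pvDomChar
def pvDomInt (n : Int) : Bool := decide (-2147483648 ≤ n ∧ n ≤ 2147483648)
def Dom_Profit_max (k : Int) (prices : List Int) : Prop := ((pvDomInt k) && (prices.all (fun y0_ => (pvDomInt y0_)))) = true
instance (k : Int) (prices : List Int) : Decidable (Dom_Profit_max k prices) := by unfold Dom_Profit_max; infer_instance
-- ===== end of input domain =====

-- B collects the positive adjacent gains with zip and sums the k largest by iterative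
-- quickselect-style three-way partitioning (alternative algorithm; A sorts and scans range(k)).

-- ===== PORT A =====
def Profit_max (k : Int) (prices : List Int) : Int :=
  if prices = [] then 0
  else
    let transactions : List Int :=
      (PySem.List.pyRange 0 ((prices.length : Int) - 1) 1).foldl
        (fun acc i =>
          if PySem.List.pyGetD prices i 0 < PySem.List.pyGetD prices (i + 1) 0 then
            acc ++ [PySem.List.pyGetD prices (i + 1) 0 - PySem.List.pyGetD prices i 0]
          else acc) []
    let transactions := PySem.List.sorted transactions (fun x => x) true
    (PySem.List.pyRange 0 k 1).foldl
      (fun acc i =>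
        if i < (transactions.length : Int) then acc + PySem.List.pyGetD transactions i 0
        else acc) 0

-- ===== PORT B =====
-- two facts the termination argument of pvSumLargestAux cites
theorem pv_dec {α : Type} (xs : List α) (p : α → Bool) (x : α) (hx : x ∈ xs) (h : p x = false) :
    (List.filter (fun y : {a // a ∈ xs} => p y.1) xs.attach).length < xs.length := by
  rw [List.filter_attach]
  simp only [List.length_map, List.length_attach]
  rw [List.length_filter_lt_length_iff_exists]
  exact ⟨x, hx, by simp [h]⟩

theorem pv_pivot_mem (xs : List Int) (h : xs ≠ []) :
    PySem.List.pyGetD xs ((xs.length : Int) / 2) 0 ∈ xs := by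
  have h0 : 0 < xs.length := List.length_pos_iff.mpr h
  have he : ((xs.length : Int) / 2) = ((xs.length / 2 : Nat) : Int) := by omega
  rw [he, PySem.List.pyGetD_natCast, List.getD_eq_getElem _ _ (by omega)]
  exact List.getElem_mem _

-- port of Source B's _sum_largest (the while loop becomes tail recursion on the same state)
def pvSumLargestAux (k : Int) (xs : List Int) (acc : Int) : Int :=
  if k ≤ 0 then acc
  else if (xs.length : Int) ≤ k then acc + xs.sum
  else
    let pivot := PySem.List.pyGetD xs (PySem.Int.floordiv (xs.length : Int) 2) 0
    let hi := xs.filter (fun x => pivot < x)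
    if k ≤ (hi.length : Int) then pvSumLargestAux k hi acc
    else
      let eq := xs.filter (fun x => x = pivot)
      if k - (hi.length : Int) ≤ (eq.length : Int) then
        acc + hi.sum + (k - (hi.length : Int)) * pivot
      else
        let lo := xs.filter (fun x => x < pivot)
        pvSumLargestAux (k - (hi.length : Int) - (eq.length : Int)) lo (acc + hi.sum + eq.sum)
termination_by xs.length
decreasing_by
  all_goals simp
  · exact pv_dec xs (fun z => decide (PySem.List.pyGetD xs ((xs.length:Int) / 2) 0 < z)) _
      (pv_pivot_mem xs (by intro hnil; subst hnil; simp only [List.length_nil, Nat.cast_zero] at *; omega)) (by simp)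
  · exact pv_dec xs (fun z => decide (z < PySem.List.pyGetD xs ((xs.length:Int) / 2) 0)) _
      (pv_pivot_mem xs (by intro hnil; subst hnil; simp only [List.length_nil, Nat.cast_zero] at *; omega)) (by simp)

def Profit_max_alt (k : Int) (prices : List Int) : Int :=
  let gains := ((prices.zip (PySem.List.slice prices (some 1) none)).filter
      (fun ab => ab.1 < ab.2)).map (fun ab => ab.2 - ab.1)
  pvSumLargestAux k gains 0

-- ===== PRECONDITION & SPEC =====
def Spec_Profit_max (k : Int) (prices : List Int) (out : Int) : Prop := out = Profit_max_alt k prices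
instance (k : Int) (prices : List Int) (out : Int) : Decidable (Spec_Profit_max k prices out) := by unfold Spec_Profit_max; infer_instance

-- ===== CLAIM (what is proved, stated in full; the proofs are below) =====
def Claim_equal_Profit_max : Prop := ∀ (k : Int) (prices : List Int), Dom_Profit_max k prices → Spec_Profit_max k prices (Profit_max k prices)

-- ===== LEMMAS AND PROOFS =====

theorem pv_filter_lt_of_not (p : Int → Bool) (l : List Int) (x : Int) (hx : x ∈ l)
    (h : ¬ p x = true) : (l.filter p).length < l.length := by
  rw [List.length_filter_lt_length_iff_exists]; exact ⟨x, hx, h⟩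

-- A's index loop visits exactly the adjacent pairs that B's zip produces
theorem pv_map_pair (prices : List Int) :
    (PySem.List.pyRange 0 ((prices.length : Int) - 1) 1).map
        (fun i => (PySem.List.pyGetD prices i 0, PySem.List.pyGetD prices (i + 1) 0))
      = prices.zip prices.tail := by
  rw [PySem.List.pyRange_one, List.map_map]
  apply List.ext_getElem
  · simp
  · intro j h1 h2
    simp only [List.getElem_map, List.getElem_range, Function.comp_apply, List.getElem_zip,
      List.getElem_tail, zero_add]
    have hj : j < prices.length - 1 := by simp at h1; omega
    have c2 : ((j:Int) + 1) = (((j+1):Nat) : Int) := by push_cast; ring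
    rw [c2, PySem.List.pyGetD_natCast, PySem.List.pyGetD_natCast,
      List.getD_eq_getElem _ _ (by omega), List.getD_eq_getElem _ _ (by omega)]

-- A's index loop builds exactly B's zip-based gains list
theorem pv_gains_eq (prices : List Int) :
    (PySem.List.pyRange 0 ((prices.length : Int) - 1) 1).foldl
        (fun acc i =>
          if PySem.List.pyGetD prices i 0 < PySem.List.pyGetD prices (i + 1) 0 then
            acc ++ [PySem.List.pyGetD prices (i + 1) 0 - PySem.List.pyGetD prices i 0]
          else acc) []
      = ((prices.zip (PySem.List.slice prices (some 1) none)).filter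
          (fun ab => ab.1 < ab.2)).map (fun ab => ab.2 - ab.1) := by
  have hs : PySem.List.slice prices (some 1) none = prices.tail := by
    rw [PySem.List.slice_from]; · simp
    omega
  have hfold :
      (PySem.List.pyRange 0 ((prices.length : Int) - 1) 1).foldl
        (fun acc i =>
          if PySem.List.pyGetD prices i 0 < PySem.List.pyGetD prices (i + 1) 0 then
            acc ++ [PySem.List.pyGetD prices (i + 1) 0 - PySem.List.pyGetD prices i 0]
          else acc) []
      = (((PySem.List.pyRange 0 ((prices.length : Int) - 1) 1).map
            (fun i => (PySem.List.pyGetD prices i 0, PySem.List.pyGetD prices (i + 1) 0))).foldl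
          (fun acc (ab : Int × Int) => if ab.1 < ab.2 then acc ++ [ab.2 - ab.1] else acc) []) := by
    rw [List.foldl_map]
  rw [hs, hfold, pv_map_pair]
  have h2 := PySem.List.foldl_append_if (fun ab : Int × Int => decide (ab.1 < ab.2))
    (fun ab : Int × Int => ab.2 - ab.1) (prices.zip prices.tail) []
  simpa using h2

theorem pv_topk_nat (ts : List Int) (m : Nat) :
    (PySem.List.pyRange 0 (m : Int) 1).foldl
        (fun acc i =>
          if i < (ts.length : Int) then acc + PySem.List.pyGetD ts i 0 else acc) 0
      = (ts.take m).sum := by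
  induction m with
  | zero => simp [PySem.List.pyRange_one_eq_nil]
  | succ m ih =>
    have h1 : ((m : Int) + 1) = ((m + 1 : Nat) : Int) := by push_cast; ring
    rw [← h1, PySem.List.pyRange_one_succ_right (by omega : (0:Int) ≤ (m:Int)),
      List.foldl_append, ih, List.take_add_one]
    by_cases hm : m < ts.length
    · simp [hm, PySem.List.pyGetD_natCast]
    · simp [hm]

-- A's guarded range(k) scan over a list sums its first k elements
theorem pv_topk_foldl (ts : List Int) (k : Int) :
    (PySem.List.pyRange 0 k 1).foldl
        (fun acc i =>
          if i < (ts.length : Int) then acc + PySem.List.pyGetD ts i 0 else acc) 0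
      = (ts.take k.toNat).sum := by
  by_cases hk : k ≤ 0
  · rw [PySem.List.pyRange_one_eq_nil hk]
    simp [Int.toNat_of_nonpos hk]
  · have hc : k = (k.toNat : Int) := by omega
    conv_lhs => rw [hc]
    rw [pv_topk_nat]

theorem pv_perm_split (xs : List Int) (p : Int) :
    xs.Perm (xs.filter (fun x => p < x) ++ (xs.filter (fun x => x = p) ++ xs.filter (fun x => x < p))) := by
  have heq : (xs.filter (fun x => !decide (p < x))).filter (fun x => decide (x = p))
      = xs.filter (fun x => decide (x = p)) := by
    rw [List.filter_filter]
    apply List.filter_congr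
    intro x _
    by_cases h : x = p <;> simp [h]
  have hlo : (xs.filter (fun x => !decide (p < x))).filter (fun x => !decide (x = p))
      = xs.filter (fun x => decide (x < p)) := by
    rw [List.filter_filter]
    apply List.filter_congr
    intro x _
    by_cases h : x = p <;> by_cases h2 : x < p <;> simp [h, h2] <;> omega
  have h1 := (List.filter_append_perm (fun x => decide (p < x)) xs).symm
  refine h1.trans (List.Perm.append_left _ ?_)
  have h2 := (List.filter_append_perm (fun x => decide (x = p)) (xs.filter (fun x => !decide (p < x)))).symm
  rw [heq, hlo] at h2
  exact h2

-- descending sort splits around any pivot value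
theorem pv_sorted_split (xs : List Int) (p : Int) :
    PySem.List.sorted xs (fun x => x) true
      = PySem.List.sorted (xs.filter (fun x => p < x)) (fun x => x) true
        ++ (xs.filter (fun x => x = p)
        ++ PySem.List.sorted (xs.filter (fun x => x < p)) (fun x => x) true) := by
  apply List.Perm.eq_of_pairwise (le := fun a b : Int => b ≤ a)
  · intro a b _ _ hab hba; omega
  · exact PySem.List.sorted_pairwise_rev xs (fun x => x)
  · rw [List.pairwise_append]
    refine ⟨PySem.List.sorted_pairwise_rev _ _, ?_, ?_⟩
    · rw [List.pairwise_append]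
      refine ⟨?_, PySem.List.sorted_pairwise_rev _ _, ?_⟩
      · apply List.pairwise_of_forall_mem_list
        intro a ha b hb
        simp [List.mem_filter] at ha hb
        omega
      · intro a ha b hb
        simp [List.mem_filter] at ha
        have hb' : b ∈ xs.filter (fun x => decide (x < p)) := (PySem.List.mem_sorted _ _ _ _).mp hb
        simp [List.mem_filter] at hb'
        omega
    · intro a ha b hb
      have ha' : a ∈ xs.filter (fun x => decide (p < x)) := (PySem.List.mem_sorted _ _ _ _).mp ha
      simp [List.mem_filter] at ha'
      rcases List.mem_append.mp hb with h | h
      · simp [List.mem_filter] at h; omega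
      · have hb' := (PySem.List.mem_sorted _ _ _ _).mp h
        simp [List.mem_filter] at hb'; omega
  · exact List.Perm.trans (PySem.List.sorted_perm _ _ _) ((pv_perm_split xs p).trans
      (List.Perm.append (PySem.List.sorted_perm _ _ _).symm
        (List.Perm.append_left _ (PySem.List.sorted_perm _ _ _).symm)))

-- B's partition loop computes the sum of the first k elements of the descending sort
theorem pv_sumLargestAux_eq (n : Nat) : ∀ (xs : List Int), xs.length = n → ∀ (k acc : Int),
    pvSumLargestAux k xs acc
      = acc + ((PySem.List.sorted xs (fun x => x) true).take k.toNat).sum := by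
  induction n using Nat.strong_induction_on with
  | _ n ih =>
  intro xs hn k acc
  rw [pvSumLargestAux]
  by_cases h1 : k ≤ 0
  · simp [h1, Int.toNat_of_nonpos h1]
  by_cases h2 : (xs.length : Int) ≤ k
  · simp only [h1, h2, if_false, if_true]
    rw [List.take_of_length_le (by rw [PySem.List.length_sorted]; omega)]
    rw [List.Perm.sum_eq (PySem.List.sorted_perm xs (fun x => x) true)]
  simp only [h1, h2, if_false]
  set p := PySem.List.pyGetD xs (PySem.Int.floordiv (xs.length : Int) 2) 0 with hp
  have hpmem : p ∈ xs := by
    rw [hp, PySem.Int.floordiv_eq_ediv_of_pos (by omega)]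
    exact pv_pivot_mem xs (by intro hnil; subst hnil; simp at h2; omega)
  set hi := xs.filter (fun x => p < x) with hhi
  set eqs := xs.filter (fun x => x = p) with heqs
  set lo := xs.filter (fun x => x < p) with hlo
  have hhilt : hi.length < xs.length :=
    pv_filter_lt_of_not _ _ p hpmem (by simp)
  have hlolt : lo.length < xs.length :=
    pv_filter_lt_of_not _ _ p hpmem (by simp)
  have hsplit := pv_sorted_split xs p
  have hkpos : 0 < k := by omega
  by_cases h3 : k ≤ (hi.length : Int)
  · simp only [h3, if_true]
    rw [ih hi.length (by omega) hi rfl k acc, hsplit,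
      List.take_append_of_le_length (by rw [PySem.List.length_sorted, ← hhi]; omega)]
  simp only [h3, if_false]
  rw [hsplit, List.take_append,
    List.take_of_length_le (by rw [PySem.List.length_sorted, ← hhi]; omega),
    List.take_append, PySem.List.length_sorted, ← hhi]
  have heqrep : eqs = List.replicate eqs.length p := by
    rw [List.eq_replicate_iff]
    exact ⟨rfl, fun b hb => by rw [heqs] at hb; simp [List.mem_filter] at hb; omega⟩
  by_cases h4 : k - (hi.length : Int) ≤ (eqs.length : Int)
  · simp only [h4, if_true]
    have htake0 : k.toNat - hi.length - eqs.length = 0 := by omega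
    have hsum_take : (List.take (k.toNat - hi.length) eqs).sum
        = ((k.toNat - hi.length : Nat) : Int) * p := by
      conv_lhs => rw [heqrep]
      have hmin : min (k.toNat - hi.length) eqs.length = k.toNat - hi.length := by omega
      rw [List.take_replicate, List.sum_replicate, hmin, nsmul_eq_mul]
    rw [htake0, List.take_zero, List.sum_append, List.sum_append, hsum_take, List.sum_nil,
      List.Perm.sum_eq (PySem.List.sorted_perm hi (fun x => x) true)]
    have hc : ((k.toNat - hi.length : Nat) : Int) = k - (hi.length : Int) := by omega
    rw [hc]; ring
  · simp only [h4, if_false]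
    rw [ih lo.length (by omega) lo rfl (k - (hi.length : Int) - (eqs.length : Int)) _,
      List.take_of_length_le (l := eqs) (by omega), List.sum_append, List.sum_append,
      List.Perm.sum_eq (PySem.List.sorted_perm hi (fun x => x) true)]
    have hc : (k - (hi.length : Int) - (eqs.length : Int)).toNat
        = k.toNat - hi.length - eqs.length := by omega
    rw [hc]; ring

-- ===== VERDICT (by name: the statement is the Claim_ definition above) =====
theorem Profit_max_spec : Claim_equal_Profit_max := by
  intro k prices _
  unfold Spec_Profit_max Profit_max Profit_max_alt
  rw [pv_gains_eq, pv_sumLargestAux_eq _ _ rfl, pv_topk_foldl, zero_add]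
  split
  · next h => subst h; simp [pysem]
  · rfl
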